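/- GENERATED by mk_final_copies.py from the proof of the farm's unit `__asan_store8_noabort` (farm:__asan_store8_noabort.1: Proof.lean) as the
   re-elaboration sweep compiled it — do not edit. -/
import Asan.CheckWalk
import Vorbis.Spec.Units.asan_store8_noabort

namespace Vorbis.Spec.asan_store8_noabort
end Vorbis.Spec.asan_store8_noabort

open X86 X86.User Asan Vorbis

set_option maxRecDepth 4000
set_option maxHeartbeats 4000000

/-- `__asan_store8_noabort` satisfies its contract `Asan.SmallCheck`: entered with accessible bytes it returns, changing only
rax rcx rdx rsp and the flags; its four paths into `__asan_report` are infeasible from `AccessibleSmall`. -/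
theorem Vorbis.Spec.Worked.asan_store8_noabort_ok : Vorbis.Spec.asan_store8_noabort.Statement := by
  intro Lay hLay μ hμ u₀ hcode
  refine SmallCheck.mk' (by omega) (by decide) ?_
  intro u ret hrip hcodeOK hsp hret hretlt hacc
  obtain ⟨hsealed, hceil, hA⟩ := hacc
  -- the two shadow bytes the routine looks at, and what `Accessible` says of them
  have hs1 := shadowOf_lt u.mem ((u.reg .rdi).toNat / 8)
  have hs2 := shadowOf_lt u.mem (((u.reg .rdi).toNat + 8 - 1) / 8)
  have hfirst := fun h => hA.first_zero (by decide) h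
  have hlast := hA.last_ok
  have e7 : (u.reg .rdi + 7).toNat = (u.reg .rdi).toNat + 7 := toNat_add_ofNat (u.reg .rdi) 7 (by omega)
  -- 0x1008e0 … 0x100909 (asan_rt.c:50, :27): the two loads from the shadow, named before the walk
  have r1 : u.mem.readLE (u.reg .rdi >>> 3 + 12582912) 1 = shadowOf u.mem ((u.reg .rdi).toNat / 8) := readLE_shadow _ _
  have r2 : u.mem.readLE ((u.reg .rdi + 7) >>> 3 + 12582912) 1 = shadowOf u.mem (((u.reg .rdi).toNat + 8 - 1) / 8) := by
    have e8 : (u.reg .rdi).toNat + 8 - 1 = (u.reg .rdi).toNat + 7 := by omega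
    rw [readLE_shadow, e7, e8]
  generalize shadowOf u.mem ((u.reg .rdi).toNat / 8) = s1 at *
  generalize shadowOf u.mem (((u.reg .rdi).toNat + 8 - 1) / 8) = s2 at *
  -- (a fact about the vector registers, so that the walk tracks them: `Checked.zmm`)
  have hzmm : u.zmm = u.zmm := rfl
  -- one walk over all eight paths (asan_rt.c:46 … :91, `SMALL_CHECK(8)`)
  u_walk hcode [hμ.vendor] span [Vorbis.L.textLo, Vorbis.L.textHi] side (v_side)
  all_goals first
    | -- a returning path (0x10091b `ret`): the state after the `ret` is `Checked`
      (refine ReachVia.done ⟨w_rip, w_rsp, RegsKept.mono_all w_kept (by rfl), w_mem, w_zmm, w_mxcsr, ?_⟩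
       rw [w_flags]
       exact X86.User.df_setStatus _ _)
    | -- a failing path (its side conditions, and the state at `__asan_report`, 0x10091c …): infeasible, the bytes are accessible
      (exfalso
       simp only [toNat_shr3, e7, byte_toNat _ hs2, byte_toInt _ hs2, and7_toInt, part32_toNat] at *
       omega)
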